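-- pv_equiv track=rewrite | github.com/lukatattoo/betting-automation | functii.py | parse_statistics
-- ===== SOURCE A (Python) =====
-- def parse_statistics(statistics_text: str):
--     """
--     Parsează blocul brut de statistici într-un dicționar.
--     Returnează dict {nume_stat: (valoare_home, valoare_away)}.
--     """
--     lines = [l.strip() for l in statistics_text.splitlines() if l.strip()]
--     stats = {}
--     i = 0
--     while i < len(lines):
--         line = lines[i]
--
--         # detectăm o cheie (linie care NU e doar cifră sau procent)
--         if not line.replace("%", "").isdigit() and ":" not in line:
--             key = line
--             values = []
--
--             j = i + 1
--             while j < len(lines) and (lines[j].replace("%", "").isdigit() or ":" in lines[j]):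
--                 val = lines[j].replace("%", "").strip()
--                 if val.isdigit():
--                     values.append(int(val))
--                 j += 1
--
--             # completăm lipsurile (dacă e doar 1 valoare, punem 0 la cealaltă)
--             if len(values) == 1:
--                 values = (values[0], 0)
--             elif len(values) >= 2:
--                 values = (values[0], values[1])
--             else:
--                 values = (0, 0)
--
--             stats[key] = values
--             i = j
--         else:
--             i += 1
--     return stats
-- ===== SOURCE B (Python) =====
-- def parse_statistics(statistics_text: str):
--     """Single flat pass over the stripped non-empty lines, tracking the current key."""
--     stats = {}
--     current_key = None
--     values = []
--
--     def flush():
--         if current_key is not None: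
--             if len(values) == 1:
--                 stats[current_key] = (values[0], 0)
--             elif len(values) >= 2:
--                 stats[current_key] = (values[0], values[1])
--             else:
--                 stats[current_key] = (0, 0)
--
--     for line in (l.strip() for l in statistics_text.splitlines()):
--         if not line:
--             continue
--         if not line.replace("%", "").isdigit() and ":" not in line:
--             flush()
--             current_key = line
--             values = []
--         else:
--             val = line.replace("%", "").strip()
--             if val.isdigit() and current_key is not None:
--                 values.append(int(val))
--     flush()
--     return stats
-- ===== Notes on version B (the rewrite author's own statement) =====
-- stated objective: simpler
-- what changed: Replaces the nested index-jumping while loops (outer key scan + inner value scan with i=j) by a single flat pass over the stripped lines that tracks the current key and its pending values and flushes on each new key and at the end.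
import Mathlib
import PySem

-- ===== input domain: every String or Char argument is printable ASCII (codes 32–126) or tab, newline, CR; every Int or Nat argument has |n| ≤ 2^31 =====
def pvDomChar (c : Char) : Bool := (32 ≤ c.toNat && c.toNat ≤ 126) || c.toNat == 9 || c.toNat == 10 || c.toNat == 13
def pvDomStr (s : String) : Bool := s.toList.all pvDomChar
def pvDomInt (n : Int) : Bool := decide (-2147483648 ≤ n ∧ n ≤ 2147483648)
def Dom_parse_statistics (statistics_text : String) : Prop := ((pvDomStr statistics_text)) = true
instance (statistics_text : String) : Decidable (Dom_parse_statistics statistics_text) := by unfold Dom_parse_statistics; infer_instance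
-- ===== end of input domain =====

-- B replaces A's nested index-jumping while loops by one flat pass with a current-key/pending-values state (objective: simpler).

-- ===== PORT A =====
-- the padding rule 'len 1 -> (v,0), len >= 2 -> (v0,v1), else (0,0)' (identical text in both Pythons)
def pvPad (vs : List Int) : Int × Int :=
  if vs.length = 1 then (vs.getD 0 0, 0)
  else if 2 ≤ vs.length then (vs.getD 0 0, vs.getD 1 0)
  else (0, 0)

-- A's inner while loop: consume value lines from position j onward, returning (values, remaining suffix)
def pvCollectA : List String → List Int × List String
  | [] => ([], [])
  | l :: rest =>
    if PySem.Str.strIsdigit (PySem.Str.replace l "%" "") || PySem.Str.isIn ":" l then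
      let val := PySem.Str.strip (PySem.Str.replace l "%" "")
      let p := pvCollectA rest
      ((if PySem.Str.strIsdigit val then [(PySem.Int.ofStr? val).getD 0] else []) ++ p.1, p.2)
    else ([], l :: rest)

theorem pvCollectA_snd_length : ∀ ls : List String, (pvCollectA ls).2.length ≤ ls.length := by
  intro ls
  induction ls with
  | nil => simp [pvCollectA]
  | cons l rest ih =>
    simp only [pvCollectA]
    split
    · exact Nat.le_succ_of_le ih
    · simp

-- A's outer while loop over the suffix of lines starting at i
def pvLoopA (ls : List String) (d : PySem.Dict String (Int × Int)) : PySem.Dict String (Int × Int) :=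
  match ls with
  | [] => d
  | l :: rest =>
    if !(PySem.Str.strIsdigit (PySem.Str.replace l "%" "")) && !(PySem.Str.isIn ":" l) then
      pvLoopA (pvCollectA rest).2 (d.insert l (pvPad (pvCollectA rest).1))
    else
      pvLoopA rest d
termination_by ls.length
decreasing_by
  · exact Nat.lt_succ_of_le (pvCollectA_snd_length rest)
  · simp

def parse_statistics (statistics_text : String) : List (String × Int × Int) :=
  -- lines = [l.strip() for l in statistics_text.splitlines() if l.strip()]
  let lines := ((PySem.Str.splitlines statistics_text).map PySem.Str.strip).filter (fun l => !(l == ""))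
  (pvLoopA lines PySem.Dict.empty).items

-- ===== PORT B =====
-- Source B's flush(): insert the pending key with the padded pending values
def pvFlushB (ck : Option String) (vs : List Int) (d : PySem.Dict String (Int × Int)) : PySem.Dict String (Int × Int) :=
  match ck with
  | none => d
  | some k => d.insert k (pvPad vs)

-- Source B's single flat for-loop (empty lines skipped by 'continue'), then the final flush
def pvLoopB : List String → Option String → List Int → PySem.Dict String (Int × Int) → PySem.Dict String (Int × Int)
  | [], ck, vs, d => pvFlushB ck vs d
  | l :: rest, ck, vs, d =>
    if l == "" then pvLoopB rest ck vs d
    else if !(PySem.Str.strIsdigit (PySem.Str.replace l "%" "")) && !(PySem.Str.isIn ":" l) then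
      pvLoopB rest (some l) [] (pvFlushB ck vs d)
    else
      let val := PySem.Str.strip (PySem.Str.replace l "%" "")
      if PySem.Str.strIsdigit val && ck.isSome then
        pvLoopB rest ck (vs ++ [(PySem.Int.ofStr? val).getD 0]) d
      else
        pvLoopB rest ck vs d

def parse_statistics_alt (statistics_text : String) : List (String × Int × Int) :=
  (pvLoopB ((PySem.Str.splitlines statistics_text).map PySem.Str.strip) none [] PySem.Dict.empty).items

-- ===== PRECONDITION & SPEC =====
def Spec_parse_statistics (statistics_text : String) (out : List (String × Int × Int)) : Prop := out = parse_statistics_alt statistics_text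
instance (statistics_text : String) (out : List (String × Int × Int)) : Decidable (Spec_parse_statistics statistics_text out) := by unfold Spec_parse_statistics; infer_instance

-- ===== CLAIM (what is proved, stated in full; the proofs are below) =====
def Claim_equal_parse_statistics : Prop := ∀ (statistics_text : String), Dom_parse_statistics statistics_text → Spec_parse_statistics statistics_text (parse_statistics statistics_text)

-- ===== LEMMAS AND PROOFS =====

-- B's 'continue' on empty lines is the same as filtering them out up front
theorem pvLoopB_filter : ∀ (ls : List String) (ck : Option String) (vs : List Int) (d : PySem.Dict String (Int × Int)),
    pvLoopB ls ck vs d = pvLoopB (ls.filter (fun l => !(l == ""))) ck vs d := by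
  intro ls
  induction ls with
  | nil => intro ck vs d; rfl
  | cons l rest ih =>
    intro ck vs d
    by_cases h : l = ""
    · subst h
      simp only [List.filter_cons, BEq.rfl, Bool.not_true, Bool.false_eq_true, if_false]
      simp only [pvLoopB, BEq.rfl, if_true]
      exact ih ck vs d
    · have hb : (l == "") = false := by simp [h]
      simp only [List.filter_cons, hb, Bool.not_false, if_true]
      simp only [pvLoopB, hb, Bool.false_eq_true, if_false]
      split
      · exact ih (some l) [] (pvFlushB ck vs d)
      · split
        · exact ih ck _ d
        · exact ih ck vs d

-- with a pending key, B's flat loop equals A's inner collection followed by the insert and A's outer loop on the rest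
theorem pvLoopB_pending : ∀ (ls : List String), (∀ l ∈ ls, l ≠ "") → ∀ (k : String) (vs : List Int) (d : PySem.Dict String (Int × Int)),
    pvLoopB ls (some k) vs d
      = pvLoopA (pvCollectA ls).2 (d.insert k (pvPad (vs ++ (pvCollectA ls).1))) := by
  intro ls
  induction ls with
  | nil => intro _ k vs d; simp [pvLoopB, pvFlushB, pvCollectA, pvLoopA]
  | cons l rest ih =>
    intro h k vs d
    have hl : (l == "") = false := by simp [h l (List.mem_cons_self)]
    have hrest : ∀ x ∈ rest, x ≠ "" := fun x hx => h x (List.mem_cons_of_mem _ hx)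
    by_cases hc : (PySem.Str.strIsdigit (PySem.Str.replace l "%" "") || PySem.Str.isIn ":" l) = true
    · -- value line: collected by A's inner loop, appended (or skipped) by B
      have hkey : (!(PySem.Str.strIsdigit (PySem.Str.replace l "%" "")) && !(PySem.Str.isIn ":" l)) = false := by
        cases hd : PySem.Str.strIsdigit (PySem.Str.replace l "%" "") <;> simp_all
      by_cases hd : PySem.Str.strIsdigit (PySem.Str.strip (PySem.Str.replace l "%" "")) = true
      · simp only [pvLoopB, hl, hkey, hd, Bool.false_eq_true, if_false, Option.isSome_some,
          Bool.and_self, if_true]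
        rw [ih hrest]
        simp only [pvCollectA, hc, if_true, hd]
        simp [List.append_assoc]
      · have hd' : PySem.Str.strIsdigit (PySem.Str.strip (PySem.Str.replace l "%" "")) = false := by
          simpa using hd
        simp only [pvLoopB, hl, hkey, hd', Bool.false_eq_true, if_false, Bool.false_and]
        rw [ih hrest]
        simp only [pvCollectA, hc, if_true, hd']
        simp
    · -- key line: A's inner loop stops here; B flushes the pending key and starts a new one
      have hc' : (PySem.Str.strIsdigit (PySem.Str.replace l "%" "") || PySem.Str.isIn ":" l) = false := by
        simpa using hc
      have hkey : (!(PySem.Str.strIsdigit (PySem.Str.replace l "%" "")) && !(PySem.Str.isIn ":" l)) = true := by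
        cases hd : PySem.Str.strIsdigit (PySem.Str.replace l "%" "") <;> simp_all
      simp only [pvLoopB, hl, hkey, Bool.false_eq_true, if_false, if_true, pvFlushB]
      rw [ih hrest]
      simp only [pvCollectA, hc', Bool.false_eq_true, if_false]
      obtain ⟨ha, hb⟩ := Bool.or_eq_false_iff.mp hc'
      conv_rhs => rw [pvLoopA.eq_def]
      simp at ha hb
      simp [ha, hb]

theorem pvLoopB_none : ∀ (ls : List String), (∀ l ∈ ls, l ≠ "") → ∀ (d : PySem.Dict String (Int × Int)),
    pvLoopB ls none [] d = pvLoopA ls d := by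
  intro ls
  induction ls with
  | nil => intro _ d; simp [pvLoopB, pvFlushB, pvLoopA]
  | cons l rest ih =>
    intro h d
    have hl : (l == "") = false := by simp [h l (List.mem_cons_self)]
    have hrest : ∀ x ∈ rest, x ≠ "" := fun x hx => h x (List.mem_cons_of_mem _ hx)
    rw [pvLoopA.eq_def]
    by_cases hkey : (!(PySem.Str.strIsdigit (PySem.Str.replace l "%" "")) && !(PySem.Str.isIn ":" l)) = true
    · simp only [pvLoopB, hl, hkey, Bool.false_eq_true, if_false, if_true, pvFlushB]
      rw [pvLoopB_pending rest hrest]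
      simp
    · have hkey' : (!(PySem.Str.strIsdigit (PySem.Str.replace l "%" "")) && !(PySem.Str.isIn ":" l)) = false := by
        simpa using hkey
      simp only [pvLoopB, hl, hkey', Bool.false_eq_true, if_false, Option.isSome_none,
        Bool.and_false, ih hrest d]

-- ===== VERDICT (by name: the statement is the Claim_ definition above) =====
theorem parse_statistics_spec : Claim_equal_parse_statistics := by
  intro s _
  unfold Spec_parse_statistics parse_statistics parse_statistics_alt
  rw [pvLoopB_filter, pvLoopB_none]
  intro l hl
  simpa using (List.of_mem_filter hl)
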